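-- pv_equiv track=rewrite | github.com/jutkko/learn | python/record-count.py | break_max_min
-- ===== SOURCE A (Python) =====
-- def break_max_min(list):
--     if len(list) < 1:
--         return [0, 0]
--     else:
--         result = [0] * 2
--         min = list[0]
--         max = list[0]
--         for n in list:
--             if n < min:
--                 result[1] += 1
--                 min = n
--             if n > max:
--                 result[0] += 1
--                 max = n
--         return result
-- ===== SOURCE B (Python) =====
-- def break_max_min(list):
--     if not list:
--         return [0, 0]
--     running_max = [list[0]]
--     running_min = [list[0]]
--     for x in list[1:]:
--         running_max.append(x if x > running_max[-1] else running_max[-1])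
--         running_min.append(x if x < running_min[-1] else running_min[-1])
--     max_breaks = sum(1 for a, b in zip(running_max, running_max[1:]) if b > a)
--     min_breaks = sum(1 for a, b in zip(running_min, running_min[1:]) if b < a)
--     return [max_breaks, min_breaks]
-- ===== Notes on version B (the rewrite author's own statement) =====
-- stated objective: alternative
-- what changed: Instead of one stateful loop mutating two counters and running min/max in place, B builds the running-max and running-min prefix tables and then counts adjacent strict changes in each table.
import Mathlib
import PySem

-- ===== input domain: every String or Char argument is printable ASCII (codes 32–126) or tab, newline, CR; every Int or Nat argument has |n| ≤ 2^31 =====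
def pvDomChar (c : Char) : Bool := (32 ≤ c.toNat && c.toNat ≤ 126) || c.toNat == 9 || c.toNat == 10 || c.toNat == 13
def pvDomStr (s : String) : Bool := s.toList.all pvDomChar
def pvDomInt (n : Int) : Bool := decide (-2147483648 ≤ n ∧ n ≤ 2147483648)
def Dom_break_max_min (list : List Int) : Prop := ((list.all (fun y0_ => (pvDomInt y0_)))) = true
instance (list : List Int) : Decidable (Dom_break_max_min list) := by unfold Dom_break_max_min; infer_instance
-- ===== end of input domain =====

-- B replaces A's single stateful loop (two counters and a running min/max updated in place)
-- by building the running-max / running-min prefix tables and then counting the adjacent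
-- strict changes in each table; objective: alternative decomposition, same cost.

-- ===== PORT A =====
-- A's loop body: the min branch, then the max branch, over state (result[0], result[1], min, max).
def pvStepA (st : Int × Int × Int × Int) (n : Int) : Int × Int × Int × Int :=
  let p1 := if n < st.2.2.1 then (st.2.1 + 1, n) else (st.2.1, st.2.2.1)
  let p0 := if n > st.2.2.2 then (st.1 + 1, n) else (st.1, st.2.2.2)
  (p0.1, p1.1, p1.2, p0.2)

def break_max_min (list : List Int) : List Int :=
  if list.length < 1 then [0, 0]
  else
    -- result = [0,0]; min = max = list[0]; then the for-loop over list
    let s := list.foldl pvStepA (0, 0, list.headD 0, list.headD 0)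
    [s.1, s.2.1]

-- ===== PORT B =====
-- append step for a table: running_max.append(x if x > running_max[-1] else running_max[-1])
def pvStepMax (acc : List Int) (x : Int) : List Int :=
  acc ++ [if x > acc.getLastD 0 then x else acc.getLastD 0]
def pvStepMin (acc : List Int) (x : Int) : List Int :=
  acc ++ [if x < acc.getLastD 0 then x else acc.getLastD 0]
-- the counting generators: sum(1 for a, b in zip(tbl, tbl[1:]) if b > a)  (resp. b < a)
def pvCntGt (c : Int) (p : Int × Int) : Int := if p.2 > p.1 then c + 1 else c
def pvCntLt (c : Int) (p : Int × Int) : Int := if p.2 < p.1 then c + 1 else c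

def break_max_min_alt (list : List Int) : List Int :=
  match list with
  | [] => [0, 0]
  | h :: t =>
    let rmax := t.foldl pvStepMax [h]
    let rmin := t.foldl pvStepMin [h]
    let maxBreaks := (rmax.zip rmax.tail).foldl pvCntGt 0
    let minBreaks := (rmin.zip rmin.tail).foldl pvCntLt 0
    [maxBreaks, minBreaks]

-- ===== PRECONDITION & SPEC =====
def Spec_break_max_min (list : List Int) (out : List Int) : Prop := out = break_max_min_alt list
instance (list : List Int) (out : List Int) : Decidable (Spec_break_max_min list out) := by unfold Spec_break_max_min; infer_instance

-- ===== CLAIM (what is proved, stated in full; the proofs are below) =====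
def Claim_equal_break_max_min : Prop := ∀ (list : List Int), Dom_break_max_min list → Spec_break_max_min list (break_max_min list)

-- ===== LEMMAS AND PROOFS =====

-- the running-max / running-min prefix tables, recursively
def scanMax (h : Int) : List Int → List Int
  | [] => [h]
  | x :: t => h :: scanMax (if x > h then x else h) t

def scanMin (h : Int) : List Int → List Int
  | [] => [h]
  | x :: t => h :: scanMin (if x < h then x else h) t

-- the max- and min-halves of A's loop state
def foldMax (t : List Int) (p : Int × Int) : Int × Int :=
  t.foldl (fun p n => if n > p.2 then (p.1 + 1, n) else (p.1, p.2)) p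
def foldMin (t : List Int) (p : Int × Int) : Int × Int :=
  t.foldl (fun p n => if n < p.2 then (p.1 + 1, n) else (p.1, p.2)) p

lemma build_max (t : List Int) : ∀ (pre : List Int) (h : Int),
    t.foldl pvStepMax (pre ++ [h]) = pre ++ scanMax h t := by
  induction t with
  | nil => intro pre h; simp [scanMax]
  | cons x t ih =>
    intro pre h
    have hstep : pvStepMax (pre ++ [h]) x = (pre ++ [h]) ++ [if x > h then x else h] := by
      simp [pvStepMax]
    simp only [List.foldl_cons, hstep]
    rw [ih (pre ++ [h]) (if x > h then x else h)]
    simp [scanMax]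

lemma build_min (t : List Int) : ∀ (pre : List Int) (h : Int),
    t.foldl pvStepMin (pre ++ [h]) = pre ++ scanMin h t := by
  induction t with
  | nil => intro pre h; simp [scanMin]
  | cons x t ih =>
    intro pre h
    have hstep : pvStepMin (pre ++ [h]) x = (pre ++ [h]) ++ [if x < h then x else h] := by
      simp [pvStepMin]
    simp only [List.foldl_cons, hstep]
    rw [ih (pre ++ [h]) (if x < h then x else h)]
    simp [scanMin]

lemma scanMax_cons (h : Int) (t : List Int) : ∃ r, scanMax h t = h :: r := by
  cases t <;> simp [scanMax]

lemma scanMin_cons (h : Int) (t : List Int) : ∃ r, scanMin h t = h :: r := by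
  cases t <;> simp [scanMin]

lemma count_max (t : List Int) : ∀ (h c : Int),
    ((scanMax h t).zip (scanMax h t).tail).foldl pvCntGt c = (foldMax t (c, h)).1 := by
  induction t with
  | nil => intro h c; simp [scanMax, foldMax]
  | cons x t ih =>
    intro h c
    obtain ⟨r, hr⟩ := scanMax_cons (if x > h then x else h) t
    have hform : scanMax h (x :: t) = h :: scanMax (if x > h then x else h) t := rfl
    rw [hform, hr]
    simp only [List.tail_cons, List.zip_cons_cons, List.foldl_cons]
    have h2 : ((if x > h then x else h) :: r).zip r
        = (scanMax (if x > h then x else h) t).zip (scanMax (if x > h then x else h) t).tail := by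
      rw [hr]; rfl
    rw [h2, ih]
    have hcnt : pvCntGt c (h, if x > h then x else h) = if x > h then c + 1 else c := by
      by_cases hx : x > h <;> simp [pvCntGt, hx]
    have step : foldMax (x :: t) (c, h)
        = foldMax t ((if x > h then c + 1 else c), (if x > h then x else h)) := by
      by_cases hx : x > h <;> simp [foldMax, hx]
    rw [hcnt, step]

lemma count_min (t : List Int) : ∀ (h c : Int),
    ((scanMin h t).zip (scanMin h t).tail).foldl pvCntLt c = (foldMin t (c, h)).1 := by
  induction t with
  | nil => intro h c; simp [scanMin, foldMin]
  | cons x t ih =>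
    intro h c
    obtain ⟨r, hr⟩ := scanMin_cons (if x < h then x else h) t
    have hform : scanMin h (x :: t) = h :: scanMin (if x < h then x else h) t := rfl
    rw [hform, hr]
    simp only [List.tail_cons, List.zip_cons_cons, List.foldl_cons]
    have h2 : ((if x < h then x else h) :: r).zip r
        = (scanMin (if x < h then x else h) t).zip (scanMin (if x < h then x else h) t).tail := by
      rw [hr]; rfl
    rw [h2, ih]
    have hcnt : pvCntLt c (h, if x < h then x else h) = if x < h then c + 1 else c := by
      by_cases hx : x < h <;> simp [pvCntLt, hx]
    have step : foldMin (x :: t) (c, h)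
        = foldMin t ((if x < h then c + 1 else c), (if x < h then x else h)) := by
      by_cases hx : x < h <;> simp [foldMin, hx]
    rw [hcnt, step]

lemma decompose (t : List Int) : ∀ (r0 r1 mn mx : Int),
    t.foldl pvStepA (r0, r1, mn, mx)
      = ((foldMax t (r0, mx)).1, (foldMin t (r1, mn)).1,
         (foldMin t (r1, mn)).2, (foldMax t (r0, mx)).2) := by
  induction t with
  | nil => intro r0 r1 mn mx; simp [foldMax, foldMin]
  | cons x t ih =>
    intro r0 r1 mn mx
    have hstep : pvStepA (r0, r1, mn, mx) x
        = ((if x > mx then r0 + 1 else r0), (if x < mn then r1 + 1 else r1),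
           (if x < mn then x else mn), (if x > mx then x else mx)) := by
      by_cases h1 : x < mn <;> by_cases h2 : x > mx <;> simp [pvStepA, h1, h2]
    have hM : foldMax (x :: t) (r0, mx)
        = foldMax t ((if x > mx then r0 + 1 else r0), (if x > mx then x else mx)) := by
      by_cases h2 : x > mx <;> simp [foldMax, h2]
    have hm : foldMin (x :: t) (r1, mn)
        = foldMin t ((if x < mn then r1 + 1 else r1), (if x < mn then x else mn)) := by
      by_cases h1 : x < mn <;> simp [foldMin, h1]
    simp only [List.foldl_cons, hstep, hM, hm]
    exact ih _ _ _ _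

-- ===== VERDICT (by name: the statement is the Claim_ definition above) =====
theorem break_max_min_spec : Claim_equal_break_max_min := by
  intro list _
  unfold Spec_break_max_min
  cases list with
  | nil => rfl
  | cons h t =>
    unfold break_max_min break_max_min_alt
    have hlen : ¬ (h :: t).length < 1 := by simp
    rw [if_neg hlen]
    have hfirst : pvStepA (0, 0, h, h) h = (0, 0, h, h) := by
      simp [pvStepA]
    have hA : (h :: t).foldl pvStepA (0, 0, (h :: t).headD 0, (h :: t).headD 0)
        = ((foldMax t (0, h)).1, (foldMin t (0, h)).1,
           (foldMin t (0, h)).2, (foldMax t (0, h)).2) := by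
      simp only [List.headD_cons, List.foldl_cons, hfirst]
      exact decompose t 0 0 h h
    have hBmax : t.foldl pvStepMax [h] = scanMax h t := by
      simpa using build_max t [] h
    have hBmin : t.foldl pvStepMin [h] = scanMin h t := by
      simpa using build_min t [] h
    simp only [hA, hBmax, hBmin, count_max, count_min]
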